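-- pv_equiv track=rewrite | github.com/foreverxujiahuan/algorithm | 竞赛/lccup2023/B.py | adventureCamp
-- ===== SOURCE A (Python) =====
-- from typing import List
--
-- def adventureCamp(expeditions: List[str]) -> int:
--     init_expeditions = set(expeditions[0].split("->"))
--     ans = -1
--     mx = 0
--     for i, expedition in enumerate(expeditions):
--         cur_expeditions = set(expedition.split("->"))
--         cur_expeditions = {t for t in cur_expeditions if t}
--         if len(cur_expeditions) - len(init_expeditions.intersection(cur_expeditions)) > mx:
--             ans = i
--             mx = len(cur_expeditions) - len(init_expeditions.intersection(cur_expeditions))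
--         init_expeditions = init_expeditions | cur_expeditions
--     return ans
-- ===== SOURCE B (Python) =====
-- from typing import List
--
-- def adventureCamp(expeditions: List[str]) -> int:
--     # Map each nonempty token to the index of the expedition where it first occurs.
--     first = {}
--     for i, expedition in enumerate(expeditions):
--         for t in expedition.split("->"):
--             if t and t not in first:
--                 first[t] = i
--     vals = list(first.values())
--     ans = -1
--     best = 0
--     # Expedition 0 is the baseline; count tokens first seen at each later index.
--     for i in range(1, len(expeditions)):
--         c = vals.count(i)
--         if c > best:
--             ans = i
--             best = c
--     return ans
-- ===== Notes on version B (the rewrite author's own statement) =====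
-- stated objective: alternative
-- what changed: Replaces A's single pass that threads a growing seen-set together with a running maximum by a two-phase algorithm: first build a dict mapping each nonempty token to the index of the expedition where it first occurs, then scan indices 1..n-1 counting tokens first seen at each index and keep the earliest strict maximum.
-- crash fix: On the empty list A raises IndexError (it reads expeditions[0]); B returns -1. — e.g. on adventureCamp([]): A raises IndexError, B returns -1
import Mathlib
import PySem

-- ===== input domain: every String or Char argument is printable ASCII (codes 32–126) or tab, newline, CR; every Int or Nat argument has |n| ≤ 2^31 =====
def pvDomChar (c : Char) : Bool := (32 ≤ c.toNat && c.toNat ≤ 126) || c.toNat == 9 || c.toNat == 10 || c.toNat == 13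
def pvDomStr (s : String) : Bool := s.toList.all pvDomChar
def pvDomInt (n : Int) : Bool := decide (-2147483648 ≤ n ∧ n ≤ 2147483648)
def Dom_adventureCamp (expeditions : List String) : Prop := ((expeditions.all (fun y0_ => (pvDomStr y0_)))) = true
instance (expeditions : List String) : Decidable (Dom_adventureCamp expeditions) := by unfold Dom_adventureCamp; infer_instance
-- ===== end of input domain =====

-- B replaces A's one-pass seen-set-with-running-max by a first-occurrence dict plus a separate
-- counting scan over indices 1..n-1 (alternative decomposition, not claimed faster); on the empty
-- list A raises IndexError while B returns -1 (see Raises_/Pre_).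

-- ===== PORT A =====
-- e.split("->"): sep is the nonempty literal "->", so split? is always `some`; the getD [] never fires
def pvSplit (e : String) : List String := (PySem.Str.split? e "->").getD []

-- the body of A's for-loop; state is (ans, mx, init_expeditions)
def pvStepA (st : Int × Int × PySem.Set String) (p : Int × String) : Int × Int × PySem.Set String :=
  let cur0 : PySem.Set String := PySem.Set.ofList (pvSplit p.2)
  let cur : PySem.Set String := PySem.Set.ofList (cur0.filter (fun t => !(t == "")))
  let d : Int := PySem.Set.len cur - PySem.Set.len (PySem.Set.inter st.2.2 cur)
  if d > st.2.1 then (p.1, d, PySem.Set.union st.2.2 cur)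
  else (st.1, st.2.1, PySem.Set.union st.2.2 cur)

def adventureCamp (expeditions : List String) : Int :=
  match PySem.List.pyGet? expeditions 0 with
  | none => 0  -- expeditions[0] raises IndexError; excluded by Pre_
  | some e0 =>
    ((PySem.List.enumerate expeditions).foldl pvStepA
      (-1, 0, PySem.Set.ofList (pvSplit e0))).1

-- ===== PORT B =====
-- inner loop body: `if t and t not in first: first[t] = i`
def pvStepTok (i : Int) (d : PySem.Dict String Int) (t : String) : PySem.Dict String Int :=
  if !(t == "") && !(d.contains t) then d.insert t i else d

-- outer loop body over enumerate(expeditions)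
def pvStepExp (d : PySem.Dict String Int) (p : Int × String) : PySem.Dict String Int :=
  (pvSplit p.2).foldl (pvStepTok p.1) d

-- body of the selection loop over range(1, len(expeditions))
def pvStepSel (vals : List Int) (st : Int × Int) (i : Int) : Int × Int :=
  let c : Int := (PySem.List.count vals i : Int)
  if c > st.2 then (i, c) else st

def adventureCamp_alt (expeditions : List String) : Int :=
  let first : PySem.Dict String Int :=
    (PySem.List.enumerate expeditions).foldl pvStepExp PySem.Dict.empty
  let vals : List Int := first.values
  ((PySem.List.pyRange 1 (expeditions.length : Int) 1).foldl (pvStepSel vals) (-1, 0)).1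

-- ===== PRECONDITION & SPEC =====
-- A reads expeditions[0], which raises IndexError on the empty list; that is all Pre_ excludes.
def Pre_adventureCamp (expeditions : List String) : Prop := expeditions ≠ []
instance (expeditions : List String) : Decidable (Pre_adventureCamp expeditions) := by unfold Pre_adventureCamp; infer_instance
def pvWitness_adventureCamp : List String := ["leo->mia", "mia->kai", "leo"]

-- On the empty list A raises IndexError (it reads expeditions[0]); B returns -1.
def Raises_adventureCamp (expeditions : List String) : Prop := expeditions = []
instance (expeditions : List String) : Decidable (Raises_adventureCamp expeditions) := by unfold Raises_adventureCamp; infer_instance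
def pvRaiseWitness_adventureCamp : List String := []
def pvRaiseWitnessOut_adventureCamp : Int := -1

def Spec_adventureCamp (expeditions : List String) (out : Int) : Prop := out = adventureCamp_alt expeditions
instance (expeditions : List String) (out : Int) : Decidable (Spec_adventureCamp expeditions out) := by unfold Spec_adventureCamp; infer_instance

-- ===== CLAIM (what is proved, stated in full; the proofs are below) =====
def Claim_equal_adventureCamp : Prop := ∀ (expeditions : List String), Dom_adventureCamp expeditions → Pre_adventureCamp expeditions → Spec_adventureCamp expeditions (adventureCamp expeditions)
def Claim_raises_adventureCamp : Prop := (∀ (expeditions : List String), Dom_adventureCamp expeditions → Raises_adventureCamp expeditions → ¬ Pre_adventureCamp expeditions) ∧ (Dom_adventureCamp (pvRaiseWitness_adventureCamp) ∧ Raises_adventureCamp (pvRaiseWitness_adventureCamp) ∧ adventureCamp_alt (pvRaiseWitness_adventureCamp) = pvRaiseWitnessOut_adventureCamp)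

-- ===== LEMMAS AND PROOFS =====

-- the nonempty tokens of l that are new w.r.t. ks, first occurrences in order
def pvNews (ks : List String) : List String → List String
  | [] => []
  | t :: l => if !(t == "") && !(ks.contains t) then t :: pvNews (ks ++ [t]) l else pvNews ks l

-- tokens seen by A before processing index i (expedition 0 is seeded into the seen set)
def pvKs (P : List String) (i : Nat) : List String := ((P.take (max i 1)).map pvSplit).flatten
-- tokens whose key is in B's dict before processing index i
def pvBKs (P : List String) (i : Nat) : List String := ((P.take i).map pvSplit).flatten

def pvCnt (P : List String) (i : Nat) : Int := ((pvNews (pvKs P i) (pvSplit (P.getD i ""))).length : Int)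

-- reference recursion both final scans reduce to
def pvRun (P : List String) (k : Nat) (fuel : Nat) (ans mx : Int) : Int :=
  match fuel with
  | 0 => ans
  | fuel + 1 =>
    if pvCnt P k > mx then pvRun P (k + 1) fuel (k : Int) (pvCnt P k)
    else pvRun P (k + 1) fuel ans mx

-- the values list of B's dict after processing the first k + fuel expeditions, from index k on
def pvVals (P : List String) (k : Nat) (fuel : Nat) : List Int :=
  match fuel with
  | 0 => []
  | fuel + 1 =>
    List.replicate (pvNews (pvBKs P k) (pvSplit (P.getD k ""))).length (k : Int) ++ pvVals P (k + 1) fuel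

theorem mem_pvNews (l : List String) (ks : List String) (t : String) :
    t ∈ pvNews ks l ↔ t ∈ l ∧ t ≠ "" ∧ t ∉ ks := by
  induction l generalizing ks with
  | nil => simp [pvNews]
  | cons a l ih =>
    simp only [pvNews]
    by_cases ha : (!(a == "") && !(ks.contains a)) = true
    · have ha' : a ≠ "" ∧ a ∉ ks := by simpa using ha
      rw [if_pos ha]
      by_cases hta : t = a
      · subst hta; simp [ih, ha'.1, ha'.2]
      · simp only [List.mem_cons, ih, List.mem_append]
        tauto
    · have ha' : a = "" ∨ a ∈ ks := by
        by_cases h1 : a = ""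
        · exact Or.inl h1
        · refine Or.inr ?_
          by_contra h2
          exact ha (by simp [h1, h2])
      rw [if_neg ha, ih]
      simp only [List.mem_cons]
      constructor
      · rintro ⟨hl, hne, hnk⟩; exact ⟨Or.inr hl, hne, hnk⟩
      · rintro ⟨(rfl | hl), hne, hnk⟩
        · rcases ha' with h | h
          · exact absurd h hne
          · exact absurd h hnk
        · exact ⟨hl, hne, hnk⟩

theorem nodup_pvNews (l : List String) (ks : List String) : (pvNews ks l).Nodup := by
  induction l generalizing ks with
  | nil => simp [pvNews]
  | cons a l ih =>
    simp only [pvNews]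
    split
    · refine List.Nodup.cons ?_ (ih _)
      intro hmem
      exact ((mem_pvNews _ _ _).mp hmem).2.2 (by simp)
    · exact ih _

theorem pv_len_eq {α : Type} [DecidableEq α] (l₁ l₂ : List α) (h₁ : l₁.Nodup) (h₂ : l₂.Nodup)
    (h : ∀ x, x ∈ l₁ ↔ x ∈ l₂) : l₁.length = l₂.length :=
  ((List.perm_ext_iff_of_nodup h₁ h₂).mpr h).length_eq

theorem pvNews_length_congr (l : List String) (ks₁ ks₂ : List String)
    (h : ∀ t, t ≠ "" → (t ∈ ks₁ ↔ t ∈ ks₂)) :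
    (pvNews ks₁ l).length = (pvNews ks₂ l).length := by
  refine pv_len_eq _ _ (nodup_pvNews _ _) (nodup_pvNews _ _) (fun x => ?_)
  simp only [mem_pvNews]
  constructor
  · rintro ⟨hl, hne, hnk⟩; exact ⟨hl, hne, fun hm => hnk ((h x hne).mpr hm)⟩
  · rintro ⟨hl, hne, hnk⟩; exact ⟨hl, hne, fun hm => hnk ((h x hne).mp hm)⟩

theorem pvCountA (S : PySem.Set String) (hS : S.Nodup) (l ks : List String)
    (hagree : ∀ t, t ≠ "" → (t ∈ S ↔ t ∈ ks)) :
    PySem.Set.len (PySem.Set.ofList ((PySem.Set.ofList l).filter (fun t => !(t == "")))) -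
      PySem.Set.len (PySem.Set.inter S (PySem.Set.ofList ((PySem.Set.ofList l).filter (fun t => !(t == ""))))) =
      ((pvNews ks l).length : Int) := by
  have hc0 : (PySem.Set.ofList l).Nodup := PySem.Set.nodup_ofList l
  have hcf : ((PySem.Set.ofList l).filter (fun t => !(t == ""))).Nodup := hc0.filter _
  rw [PySem.Set.ofList_eq_self_of_nodup _ hcf]
  set curf := (PySem.Set.ofList l).filter (fun t => !(t == "")) with hcurf
  have hmemf : ∀ t, t ∈ curf ↔ t ∈ l ∧ t ≠ "" := by
    intro t
    simp [hcurf, List.mem_filter, PySem.Set.mem_ofList]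
  have hint : (PySem.Set.inter S curf).length = (curf.filter (fun t => decide (t ∈ S))).length := by
    refine pv_len_eq _ _ (PySem.Set.nodup_inter _ _ hS) (hcf.filter _) (fun x => ?_)
    rw [PySem.Set.mem_inter]
    simp [List.mem_filter]
    tauto
  have hnews : (curf.filter (fun t => !decide (t ∈ S))).length = (pvNews ks l).length := by
    refine pv_len_eq _ _ (hcf.filter _) (nodup_pvNews _ _) (fun x => ?_)
    rw [mem_pvNews]
    simp only [List.mem_filter, hmemf, Bool.not_eq_true', decide_eq_false_iff_not]
    constructor
    · rintro ⟨⟨hl, hne⟩, hns⟩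
      exact ⟨hl, hne, fun hk => hns ((hagree x hne).mpr hk)⟩
    · rintro ⟨hl, hne, hnk⟩
      exact ⟨⟨hl, hne⟩, fun hs => hnk ((hagree x hne).mp hs)⟩
  have hsplit : curf.length = (curf.filter (fun t => decide (t ∈ S))).length +
      (curf.filter (fun t => !decide (t ∈ S))).length := List.length_eq_length_filter_add _
  simp only [PySem.Set.len]
  rw [hint, ← hnews]
  omega

theorem pvKs_succ_mem (P : List String) (k : Nat) (e : String) (he : P[k]? = some e) (t : String) :
    t ∈ pvKs P (k + 1) ↔ t ∈ pvKs P k ∨ t ∈ pvSplit e := by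
  cases k with
  | zero =>
    cases P with
    | nil => simp at he
    | cons a P' =>
      simp only [List.getElem?_cons_zero, Option.some.injEq] at he
      subst he
      simp [pvKs]
  | succ k =>
    have h1 : P.take (k + 2) = P.take (k + 1) ++ [e] := by simp [List.take_add_one, he]
    simp only [pvKs, Nat.max_eq_left (by omega : 1 ≤ k + 1 + 1), Nat.max_eq_left (by omega : 1 ≤ k + 1), h1]
    simp [List.mem_flatten]

theorem pvBKs_succ_mem (P : List String) (k : Nat) (e : String) (he : P[k]? = some e) (t : String) :
    t ∈ pvBKs P (k + 1) ↔ t ∈ pvBKs P k ∨ t ∈ pvSplit e := by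
  have h1 : P.take (k + 1) = P.take k ++ [e] := by simp [List.take_add_one, he]
  simp only [pvBKs, h1]
  simp [List.mem_flatten]

theorem pvGA (rest : List String) (P : List String) (k : Nat) (S : PySem.Set String) (ans mx : Int)
    (hdrop : P.drop k = rest) (hS : S.Nodup) (hmem : ∀ t, t ≠ "" → (t ∈ S ↔ t ∈ pvKs P k)) :
    ((PySem.List.enumerate rest (k : Int)).foldl pvStepA (ans, mx, S)).1 = pvRun P k rest.length ans mx := by
  induction rest generalizing k S ans mx with
  | nil => simp [PySem.List.enumerate, pvRun]
  | cons e rest' ih =>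
    have hget : P[k]? = some e := by
      have h0 : (P.drop k)[0]? = P[k]? := by simpa using (List.getElem?_drop P k 0)
      rw [hdrop] at h0
      simpa using h0.symm
    have hdrop' : P.drop (k + 1) = rest' := by
      have h := congrArg (List.drop 1) hdrop
      rw [List.drop_drop] at h
      simpa [Nat.add_comm] using h
    have hgetD : P.getD k "" = e := by simp [List.getD_eq_getElem?_getD, hget]
    set cur := PySem.Set.ofList ((PySem.Set.ofList (pvSplit e)).filter (fun t => !(t == ""))) with hcur
    have hd : PySem.Set.len cur - PySem.Set.len (PySem.Set.inter S cur) = pvCnt P k := by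
      rw [pvCnt, hgetD]
      exact pvCountA S hS (pvSplit e) (pvKs P k) hmem
    have hstep : pvStepA (ans, mx, S) ((k : Int), e) =
        if pvCnt P k > mx then ((k : Int), pvCnt P k, PySem.Set.union S cur)
        else (ans, mx, PySem.Set.union S cur) := by
      simp only [pvStepA, ← hcur, hd]
    have hS' : (PySem.Set.union S cur).Nodup := PySem.Set.nodup_union _ _ hS
    have hmem' : ∀ t, t ≠ "" → (t ∈ PySem.Set.union S cur ↔ t ∈ pvKs P (k + 1)) := by
      intro t ht
      rw [PySem.Set.mem_union, pvKs_succ_mem P k e hget t]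
      have hcm : t ∈ cur ↔ t ∈ pvSplit e := by
        simp [hcur, PySem.Set.mem_ofList, List.mem_filter, ht]
      rw [hcm, hmem t ht]
    rw [PySem.List.enumerate_cons, List.foldl_cons, hstep]
    have hcast : (k : Int) + 1 = ((k + 1 : Nat) : Int) := by push_cast; ring
    by_cases hc : pvCnt P k > mx
    · rw [if_pos hc]
      rw [hcast]
      rw [ih (k + 1) (PySem.Set.union S cur) (k : Int) (pvCnt P k) hdrop' hS' hmem']
      simp [pvRun, hc]
    · rw [if_neg hc]
      rw [hcast]
      rw [ih (k + 1) (PySem.Set.union S cur) ans mx hdrop' hS' hmem']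
      simp [pvRun, hc]

theorem pvAeq (P : List String) (hP : P ≠ []) :
    adventureCamp P = pvRun P 0 P.length (-1) 0 := by
  obtain ⟨e0, P', rfl⟩ : ∃ e P', P = e :: P' := by
    cases P with
    | nil => exact absurd rfl hP
    | cons e P' => exact ⟨e, P', rfl⟩
  have hget : PySem.List.pyGet? (e0 :: P') 0 = some e0 := by
    simp [PySem.List.pyGet?, PySem.List.pyIdx?]
  unfold adventureCamp
  rw [hget]
  have h := pvGA (e0 :: P') (e0 :: P') 0 (PySem.Set.ofList (pvSplit e0)) (-1) 0 rfl
    (PySem.Set.nodup_ofList _) (fun t _ => by simp [PySem.Set.mem_ofList, pvKs])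
  simpa using h

theorem pvInner (l : List String) (d : PySem.Dict String Int) (i : Int) :
    (l.foldl (pvStepTok i) d).values = d.values ++ List.replicate (pvNews d.keys l).length i ∧
      (l.foldl (pvStepTok i) d).keys = d.keys ++ pvNews d.keys l := by
  induction l generalizing d with
  | nil => simp [pvNews]
  | cons t l ih =>
    have hck : d.keys.contains t = d.contains t := by
      by_cases h : t ∈ d.keys
      · simp [h, (PySem.Dict.contains_iff_mem_keys d t).mpr h]
      · have hc : d.contains t = false := by
          cases hc : d.contains t
          · rfl
          · exact absurd ((PySem.Dict.contains_iff_mem_keys d t).mp hc) h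
        simp [hc]
        simpa using h
    simp only [List.foldl_cons, pvStepTok, pvNews, hck]
    by_cases hcond : (!(t == "") && !(d.contains t)) = true
    · have hfresh : d.contains t = false := by
        rcases Bool.and_eq_true_iff.mp hcond with ⟨-, h2⟩
        simpa using h2
      rw [if_pos hcond, if_pos hcond]
      obtain ⟨hv, hk⟩ := ih (d.insert t i)
      rw [PySem.Dict.keys_insert_of_not_contains d i hfresh] at hv hk
      constructor
      · rw [hv]
        simp [PySem.Dict.values, PySem.Dict.items_insert_of_not_contains d i hfresh,
          List.replicate_succ]
      · rw [hk]
        simp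
    · rw [if_neg hcond, if_neg hcond]
      exact ih d

theorem pvGB (rest : List String) (P : List String) (k : Nat) (d : PySem.Dict String Int)
    (hdrop : P.drop k = rest) (hnd : d.keys.Nodup)
    (hmem : ∀ t, t ≠ "" → (t ∈ d.keys ↔ t ∈ pvBKs P k)) :
    ((PySem.List.enumerate rest (k : Int)).foldl pvStepExp d).values = d.values ++ pvVals P k rest.length := by
  induction rest generalizing k d with
  | nil => simp [PySem.List.enumerate, pvVals]
  | cons e rest' ih =>
    have hget : P[k]? = some e := by
      have h0 : (P.drop k)[0]? = P[k]? := by simpa using (List.getElem?_drop P k 0)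
      rw [hdrop] at h0
      simpa using h0.symm
    have hdrop' : P.drop (k + 1) = rest' := by
      have h := congrArg (List.drop 1) hdrop
      rw [List.drop_drop] at h
      simpa [Nat.add_comm] using h
    have hgetD : P.getD k "" = e := by simp [List.getD_eq_getElem?_getD, hget]
    obtain ⟨hv, hk⟩ := pvInner (pvSplit e) d ((k : Int))
    have hlen : (pvNews d.keys (pvSplit e)).length = (pvNews (pvBKs P k) (pvSplit e)).length :=
      pvNews_length_congr _ _ _ hmem
    have hnd' : ((pvSplit e).foldl (pvStepTok (k : Int)) d).keys.Nodup := by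
      rw [hk]
      refine List.Nodup.append hnd (nodup_pvNews _ _) ?_
      intro t htk htn
      exact ((mem_pvNews _ _ _).mp htn).2.2 htk
    have hmem' : ∀ t, t ≠ "" → (t ∈ ((pvSplit e).foldl (pvStepTok (k : Int)) d).keys ↔ t ∈ pvBKs P (k + 1)) := by
      intro t ht
      rw [hk, List.mem_append, mem_pvNews, pvBKs_succ_mem P k e hget t, hmem t ht]
      by_cases hsp : t ∈ pvSplit e
      · by_cases hbk : t ∈ pvBKs P k
        · simp [hsp, hbk]
        · simp [hsp, hbk, ht]
      · simp [hsp]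
    rw [PySem.List.enumerate_cons, List.foldl_cons]
    have hcast : (k : Int) + 1 = ((k + 1 : Nat) : Int) := by push_cast; ring
    rw [show pvStepExp d ((k : Int), e) = (pvSplit e).foldl (pvStepTok (k : Int)) d from rfl, hcast,
      ih (k + 1) _ hdrop' hnd' hmem', hv]
    simp only [List.length_cons, pvVals, hgetD, ← hlen]
    simp

theorem pvVals_mem_ge (P : List String) (k fuel : Nat) (v : Int) (h : v ∈ pvVals P k fuel) :
    (k : Int) ≤ v := by
  induction fuel generalizing k with
  | zero => simp [pvVals] at h
  | succ fuel ih =>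
    simp only [pvVals, List.mem_append] at h
    rcases h with h | h
    · rw [List.eq_of_mem_replicate h]
    · have := ih (k + 1) h
      push_cast at this ⊢
      omega

theorem pvVals_count (P : List String) (k fuel i : Nat) (hki : k ≤ i) (hif : i < k + fuel) :
    (PySem.List.count (pvVals P k fuel) ((i : Nat) : Int) : Int) =
      ((pvNews (pvBKs P i) (pvSplit (P.getD i ""))).length : Int) := by
  induction fuel generalizing k with
  | zero => omega
  | succ fuel ih =>
    simp only [pvVals, PySem.List.count_eq, List.count_append]
    rcases Nat.eq_or_lt_of_le hki with rfl | hlt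
    · have h0 : List.count ((k : Int)) (pvVals P (k + 1) fuel) = 0 := by
        refine List.count_eq_zero.mpr ?_
        intro hmem
        exact absurd (pvVals_mem_ge P (k + 1) fuel _ hmem) (by push_cast; omega)
      rw [h0, List.count_replicate]
      simp
    · have h0 : List.count ((i : Int)) (List.replicate (pvNews (pvBKs P k) (pvSplit (P.getD k ""))).length ((k : Int))) = 0 := by
        rw [List.count_replicate]
        have : ¬ ((k : Int) = (i : Int)) := by push_cast; omega
        simp [this]
      rw [h0]
      have := ih (k + 1) (by omega) (by omega)
      simpa [PySem.List.count_eq] using this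

theorem pvCnt_eq_cntB (P : List String) (i : Nat) (hi : 1 ≤ i) :
    pvCnt P i = ((pvNews (pvBKs P i) (pvSplit (P.getD i ""))).length : Int) := by
  simp [pvCnt, pvKs, pvBKs, Nat.max_eq_left hi]

theorem pvGB2 (P : List String) (vals : List Int) (fuel : Nat) (k : Nat) (ans mx : Int)
    (h : ∀ j, j < fuel → (PySem.List.count vals ((k + j : Nat) : Int) : Int) = pvCnt P (k + j)) :
    ((PySem.List.pyRange (k : Int) ((k + fuel : Nat) : Int) 1).foldl (pvStepSel vals) (ans, mx)).1 =
      pvRun P k fuel ans mx := by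
  induction fuel generalizing k ans mx with
  | zero =>
    rw [PySem.List.pyRange_one_eq_nil (by omega)]
    simp [pvRun]
  | succ fuel ih =>
    rw [PySem.List.pyRange_one_cons (by push_cast; omega), List.foldl_cons]
    have hc : (PySem.List.count vals ((k : Int)) : Int) = pvCnt P k := by
      have := h 0 (by omega)
      simpa using this
    have hstep : pvStepSel vals (ans, mx) ((k : Int)) =
        if pvCnt P k > mx then ((k : Int), pvCnt P k) else (ans, mx) := by
      simp only [pvStepSel, hc]
    rw [hstep]
    have hcast : (k : Int) + 1 = ((k + 1 : Nat) : Int) := by push_cast; ring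
    have hcast2 : ((k + (fuel + 1) : Nat) : Int) = (((k + 1) + fuel : Nat) : Int) := by push_cast; ring
    have h' : ∀ j, j < fuel → (PySem.List.count vals (((k + 1) + j : Nat) : Int) : Int) = pvCnt P ((k + 1) + j) := by
      intro j hj
      have := h (j + 1) (by omega)
      have harg : k + (j + 1) = (k + 1) + j := by omega
      rwa [harg] at this
    by_cases hcnd : pvCnt P k > mx
    · rw [if_pos hcnd, hcast, hcast2, ih (k + 1) (k : Int) (pvCnt P k) h']
      simp [pvRun, hcnd]
    · rw [if_neg hcnd, hcast, hcast2, ih (k + 1) ans mx h']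
      simp [pvRun, hcnd]

theorem pvCnt_zero (P : List String) : pvCnt P 0 = 0 := by
  have hnil : pvNews (pvKs P 0) (pvSplit (P.getD 0 "")) = [] := by
    rw [List.eq_nil_iff_forall_not_mem]
    intro t htm
    obtain ⟨hl, hne, hnk⟩ := (mem_pvNews _ _ _).mp htm
    cases P with
    | nil =>
      have : pvSplit ((([] : List String)).getD 0 "") = [""] := rfl
      rw [this] at hl
      simp at hl
      exact hne hl
    | cons a P' =>
      refine hnk ?_
      simpa [pvKs] using hl
  unfold pvCnt
  rw [hnil]
  rfl

theorem pvBeq (P : List String) (hP : P ≠ []) :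
    adventureCamp_alt P = pvRun P 1 (P.length - 1) (-1) 0 := by
  have hlen : 1 ≤ P.length := by
    cases P with
    | nil => exact absurd rfl hP
    | cons a P' => simp
  have hvals : ((PySem.List.enumerate P 0).foldl pvStepExp PySem.Dict.empty).values = pvVals P 0 P.length := by
    have h := pvGB P P 0 PySem.Dict.empty rfl (by simp [PySem.Dict.keys, PySem.Dict.empty]) ?_
    · simpa [PySem.Dict.values] using h
    · intro t _
      simp [PySem.Dict.keys, PySem.Dict.empty, pvBKs]
  rw [show adventureCamp_alt P = ((PySem.List.pyRange 1 (P.length : Int) 1).foldl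
      (pvStepSel (((PySem.List.enumerate P 0).foldl pvStepExp PySem.Dict.empty).values)) (-1, 0)).1 from rfl,
    hvals]
  have h2 := pvGB2 P (pvVals P 0 P.length) (P.length - 1) 1 (-1) 0 ?_
  · have hc1 : ((1 : Nat) : Int) = (1 : Int) := by norm_num
    have hc2 : ((1 + (P.length - 1) : Nat) : Int) = (P.length : Int) := by
      push_cast [Nat.add_sub_cancel' hlen]
      ring
    rw [hc1, hc2] at h2
    exact h2
  · intro j hj
    rw [pvVals_count P 0 P.length (1 + j) (by omega) (by omega)]
    rw [pvCnt_eq_cntB P (1 + j) (by omega)]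

-- ===== VERDICT (by name: the statement is the Claim_ definition above) =====
theorem adventureCamp_spec : Claim_equal_adventureCamp := by
  intro P _ hP
  unfold Spec_adventureCamp
  rw [pvAeq P hP, pvBeq P hP]
  obtain ⟨e, P', rfl⟩ : ∃ e P', P = e :: P' := by
    cases P with
    | nil => exact absurd rfl hP
    | cons e P' => exact ⟨e, P', rfl⟩
  show pvRun _ 0 (P'.length + 1) (-1) 0 = _
  rw [pvRun, pvCnt_zero]
  norm_num

@[simp] theorem adventureCamp_raises : Claim_raises_adventureCamp := by
  unfold Claim_raises_adventureCamp
  exact ⟨fun e _ hr hp => hp hr, by decide⟩
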